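-- pv_equiv track=rewrite | github.com/alexmgns/code-gym-dec18-snapshot | src/utils/complexity.py | compute
-- ===== SOURCE A (Python) =====
-- from typing import Any, Dict, Optional
--
-- def compute(code: str, ast_tree: Optional[Any] = None) -> Dict[str, int]:
--     total, comments, blanks = 0, 0, 0
--     for line in code.splitlines():
--         total += 1
--         stripped = line.strip()
--         if not stripped:
--             blanks += 1
--         elif stripped.startswith("#"):
--             comments += 1
--     return {"loc": total, "cloc": comments, "bloc": blanks}
-- ===== SOURCE B (Python) =====
-- def compute(code, ast_tree=None):
--     firsts = [line.strip()[:1] for line in code.splitlines()]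
--     return {"loc": len(firsts), "cloc": firsts.count("#"), "bloc": firsts.count("")}
-- ===== Notes on version B (the rewrite author's own statement) =====
-- stated objective: simpler
-- what changed: B replaces A's fused accumulator loop by mapping each line to its stripped first character and counting '#' and '' occurrences in that list (loc is its length).
import Mathlib
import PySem

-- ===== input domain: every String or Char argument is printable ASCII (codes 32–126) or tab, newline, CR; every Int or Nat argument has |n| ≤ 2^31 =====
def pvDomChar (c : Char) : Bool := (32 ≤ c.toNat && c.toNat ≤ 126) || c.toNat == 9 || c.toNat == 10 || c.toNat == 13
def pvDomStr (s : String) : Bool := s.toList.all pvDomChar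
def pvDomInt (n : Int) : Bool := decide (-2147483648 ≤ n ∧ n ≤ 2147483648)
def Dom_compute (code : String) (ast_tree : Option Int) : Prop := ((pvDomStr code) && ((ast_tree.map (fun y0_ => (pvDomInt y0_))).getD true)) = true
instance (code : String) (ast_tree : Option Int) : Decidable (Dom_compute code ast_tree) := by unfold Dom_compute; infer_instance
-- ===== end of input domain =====

-- B maps each line to its stripped first character and counts; same O(n) cost, different decomposition.

-- ===== PORT A =====
def compute (code : String) (_ast_tree : Option Int) : List (String × Int) :=
  let r := (PySem.Str.splitlines code).foldl
    (fun (s : Int × Int × Int) line =>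
      let total := s.1 + 1
      let stripped := PySem.Str.strip line
      if stripped == "" then (total, s.2.1, s.2.2 + 1)
      else if PySem.Str.startswith stripped "#" then (total, s.2.1 + 1, s.2.2)
      else (total, s.2.1, s.2.2))
    (0, 0, 0)
  [("loc", r.1), ("cloc", r.2.1), ("bloc", r.2.2)]

-- ===== PORT B =====
def compute_alt (code : String) (_ast_tree : Option Int) : List (String × Int) :=
  let firsts := (PySem.Str.splitlines code).map
    (fun line => PySem.Str.slice (PySem.Str.strip line) none (some 1))
  [("loc", (firsts.length : Int)),
   ("cloc", (PySem.List.count firsts "#" : Int)),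
   ("bloc", (PySem.List.count firsts "" : Int))]

-- ===== PRECONDITION & SPEC =====
def Spec_compute (code : String) (ast_tree : Option Int) (out : List (String × Int)) : Prop := out = compute_alt code ast_tree
instance (code : String) (ast_tree : Option Int) (out : List (String × Int)) : Decidable (Spec_compute code ast_tree out) := by unfold Spec_compute; infer_instance

-- ===== CLAIM (what is proved, stated in full; the proofs are below) =====
def Claim_equal_compute : Prop := ∀ (code : String) (ast_tree : Option Int), Dom_compute code ast_tree → Spec_compute code ast_tree (compute code ast_tree)

-- ===== LEMMAS AND PROOFS =====

lemma pvFirst_toList (l : String) :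
    (PySem.Str.slice (PySem.Str.strip l) none (some 1)).toList
      = (PySem.Chars.strip l.toList).take 1 := by
  rw [PySem.Str.toList_slice, PySem.Chars.slice_eq_listSlice,
    PySem.List.slice_to _ (by norm_num : (0:Int) ≤ 1), PySem.Str.toList_strip]
  rfl

lemma pvFirst_eq_empty_iff (l : String) :
    (PySem.Str.slice (PySem.Str.strip l) none (some 1) = "") ↔ PySem.Str.strip l = "" := by
  rw [← String.toList_inj, ← String.toList_inj (s₁ := PySem.Str.strip l), pvFirst_toList,
    PySem.Str.toList_strip]
  cases PySem.Chars.strip l.toList <;> simp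

lemma pvFirst_eq_hash_iff (l : String) :
    (PySem.Str.slice (PySem.Str.strip l) none (some 1) = "#")
      ↔ (PySem.Str.strip l ≠ "" ∧ PySem.Str.startswith (PySem.Str.strip l) "#" = true) := by
  rw [← String.toList_inj, pvFirst_toList, PySem.Str.startswith_eq, PySem.Str.toList_strip,
    PySem.Chars.startswith_iff]
  have hne : (PySem.Str.strip l ≠ "") ↔ PySem.Chars.strip l.toList ≠ [] := by
    rw [ne_eq, ← String.toList_inj, PySem.Str.toList_strip]; simp
  rw [hne]
  cases PySem.Chars.strip l.toList with
  | nil => simp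
  | cons c cs => simp [List.cons_prefix_cons, eq_comm]

lemma step_fold (L : List String) (a b c : Int) :
    L.foldl
      (fun (s : Int × Int × Int) line =>
        let total := s.1 + 1
        let stripped := PySem.Str.strip line
        if stripped == "" then (total, s.2.1, s.2.2 + 1)
        else if PySem.Str.startswith stripped "#" then (total, s.2.1 + 1, s.2.2)
        else (total, s.2.1, s.2.2))
      (a, b, c) =
      (a + L.length,
       b + ((L.map (fun line => PySem.Str.slice (PySem.Str.strip line) none (some 1))).count "#" : Int),
       c + ((L.map (fun line => PySem.Str.slice (PySem.Str.strip line) none (some 1))).count "" : Int)) := by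
  induction L generalizing a b c with
  | nil => simp
  | cons l L ih =>
    simp only [List.foldl_cons, List.map_cons, List.count_cons, List.length_cons]
    by_cases h1 : PySem.Str.strip l = ""
    · have hf : PySem.Str.slice (PySem.Str.strip l) none (some 1) = "" :=
        (pvFirst_eq_empty_iff l).mpr h1
      rw [if_pos (by simp [h1])]
      rw [ih]
      simp [hf]
      refine ⟨by ring, by ring⟩
    · by_cases h2 : PySem.Str.startswith (PySem.Str.strip l) "#" = true
      · have hf : PySem.Str.slice (PySem.Str.strip l) none (some 1) = "#" :=
          (pvFirst_eq_hash_iff l).mpr ⟨h1, h2⟩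
        rw [if_neg (by simp [h1]), if_pos h2, ih]
        simp [hf]
        refine ⟨by ring, by ring⟩
      · have hf1 : PySem.Str.slice (PySem.Str.strip l) none (some 1) ≠ "" :=
          fun hh => h1 ((pvFirst_eq_empty_iff l).mp hh)
        have hf2 : PySem.Str.slice (PySem.Str.strip l) none (some 1) ≠ "#" :=
          fun hh => h2 ((pvFirst_eq_hash_iff l).mp hh).2
        rw [if_neg (by simp [h1]), if_neg h2, ih]
        simp [hf1, hf2]
        ring

-- ===== VERDICT (by name: the statement is the Claim_ definition above) =====
theorem compute_spec : Claim_equal_compute := by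
  intro code ast_tree _
  show compute code ast_tree = compute_alt code ast_tree
  unfold compute compute_alt
  rw [step_fold]
  simp [PySem.List.count]
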